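-- pv_equiv track=rewrite | github.com/Galterino/Python-Experience-Training | Work with dictionaries and sets/1_histogram.py | invert_histogram
-- ===== SOURCE A (Python) =====
-- def invert_histogram(histogram_dict:dict) -> dict:
--
--     """
--     func makes histogram inverted, where numbers are keys, and symbols are values
--
--     :param histogram_dict:
--     :return inverted_histogram_dict:
--     """
--
--     inverted_dict = dict()
--
--     for symbol, count in histogram_dict.items():
--         if count in inverted_dict:
--             inverted_dict[count].append(symbol)
--         else:
--             inverted_dict[count] = [symbol]
--
--     return inverted_dict
-- ===== SOURCE B (Python) =====
-- def invert_histogram(histogram_dict: dict) -> dict: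
--     """Inverted histogram: count -> list of symbols, via two passes (distinct counts, then filter)."""
--     counts = dict.fromkeys(histogram_dict.values())
--     return {c: [s for s, v in histogram_dict.items() if v == c] for c in counts}
-- ===== Notes on version B (the rewrite author's own statement) =====
-- stated objective: alternative
-- what changed: Replaces the single accumulate-into-a-dict loop with two passes: first collect the distinct counts in first-occurrence order (dict.fromkeys), then a dict comprehension that builds each count's symbol list by filtering the items once per distinct count.
import Mathlib
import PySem

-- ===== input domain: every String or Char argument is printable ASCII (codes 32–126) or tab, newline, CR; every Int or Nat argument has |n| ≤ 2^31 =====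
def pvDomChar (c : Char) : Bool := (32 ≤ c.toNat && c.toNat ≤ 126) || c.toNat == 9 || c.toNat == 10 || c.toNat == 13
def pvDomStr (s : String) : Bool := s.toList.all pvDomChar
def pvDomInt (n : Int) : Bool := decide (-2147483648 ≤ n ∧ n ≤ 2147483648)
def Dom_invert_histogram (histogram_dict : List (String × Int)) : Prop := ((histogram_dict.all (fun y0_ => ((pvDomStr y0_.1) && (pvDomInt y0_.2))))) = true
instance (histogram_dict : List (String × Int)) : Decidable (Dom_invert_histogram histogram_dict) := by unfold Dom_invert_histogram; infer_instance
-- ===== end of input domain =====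

-- ===== PORT A =====
-- one loop accumulating symbols into a dict keyed by count
def invert_histogram (histogram_dict : List (String × Int)) : List (Int × List String) :=
  (histogram_dict.foldl
    (fun inverted_dict p =>
      if inverted_dict.contains p.2 then
        inverted_dict.modify p.2 [] (fun l => l ++ [p.1])
      else
        inverted_dict.insert p.2 [p.1])
    (PySem.Dict.empty : PySem.Dict Int (List String))).items

-- ===== PORT B =====
-- B: distinct counts in first-occurrence order, then one filter pass per distinct count
def invert_histogram_alt (histogram_dict : List (String × Int)) : List (Int × List String) :=
  (PySem.List.dedup (histogram_dict.map (fun p => p.2))).map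
    (fun c => (c, (histogram_dict.filter (fun p => p.2 == c)).map (fun p => p.1)))

-- ===== PRECONDITION & SPEC =====
def Spec_invert_histogram (histogram_dict : List (String × Int)) (out : List (Int × List String)) : Prop := out = invert_histogram_alt histogram_dict
instance (histogram_dict : List (String × Int)) (out : List (Int × List String)) : Decidable (Spec_invert_histogram histogram_dict out) := by unfold Spec_invert_histogram; infer_instance

-- ===== CLAIM (what is proved, stated in full; the proofs are below) =====
def Claim_equal_invert_histogram : Prop := ∀ (histogram_dict : List (String × Int)), Dom_invert_histogram histogram_dict → Spec_invert_histogram histogram_dict (invert_histogram histogram_dict)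

-- ===== LEMMAS AND PROOFS =====

-- A's if/else step is exactly 'modify': when the key is absent, modify appends f []
theorem inv_step_eq (d : PySem.Dict Int (List String)) (p : String × Int) :
    (if d.contains p.2 then d.modify p.2 [] (fun l => l ++ [p.1])
     else d.insert p.2 [p.1])
    = d.modify p.2 [] (fun l => l ++ [p.1]) := by
  by_cases h : d.contains p.2 = true
  · simp [h]
  · simp only [h, PySem.Dict.modify,
      PySem.Dict.getD_of_not_contains d [] (by simpa using h)]
    simp

-- the accumulated dict, keyed at c, holds exactly the symbols whose count is c
theorem inv_getD (h : List (String × Int)) (c : Int) :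
    (h.foldl (fun d p => d.modify p.2 [] (fun l => l ++ [p.1]))
      (PySem.Dict.empty : PySem.Dict Int (List String))).getD c []
    = (h.filter (fun p => p.2 == c)).map (fun p => p.1) := by
  have hm : (h.map (fun p => (p.2, p.1))).foldl
      (fun d q => d.modify q.1 [] (fun l => l ++ [q.2]))
      (PySem.Dict.empty : PySem.Dict Int (List String))
      = h.foldl (fun d p => d.modify p.2 [] (fun l => l ++ [p.1])) PySem.Dict.empty := by
    rw [List.foldl_map]
  rw [← hm, PySem.Dict.getD_foldl_modify_append]
  simp [List.filter_map, Function.comp_def]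

theorem invert_histogram_eq (h : List (String × Int)) :
    invert_histogram h = invert_histogram_alt h := by
  unfold invert_histogram invert_histogram_alt
  have hstep : (fun (d : PySem.Dict Int (List String)) (p : String × Int) =>
      if d.contains p.2 then d.modify p.2 [] (fun l => l ++ [p.1])
      else d.insert p.2 [p.1])
      = fun d p => d.modify p.2 [] (fun l => l ++ [p.1]) :=
    funext fun d => funext fun p => inv_step_eq d p
  rw [hstep]
  have hnd : (h.foldl (fun d p => d.modify p.2 [] (fun l => l ++ [p.1]))
      (PySem.Dict.empty : PySem.Dict Int (List String))).keys.Nodup :=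
    PySem.Dict.nodup_keys_foldl_modify_key h (fun p => p.2) []
      (fun _ p l => l ++ [p.1]) PySem.Dict.empty (by simp)
  rw [PySem.Dict.items_eq_map_keys _ hnd []]
  have hkeys : (h.foldl (fun d p => d.modify p.2 [] (fun l => l ++ [p.1]))
      (PySem.Dict.empty : PySem.Dict Int (List String))).keys
      = PySem.List.dedup (h.map (fun p => p.2)) := by
    rw [PySem.Dict.keys_foldl_modify_key h (fun p => p.2) []
      (fun _ p l => l ++ [p.1]) PySem.Dict.empty]
    rfl
  rw [hkeys]
  exact List.map_congr_left fun c _ => by rw [inv_getD]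

-- ===== VERDICT (by name: the statement is the Claim_ definition above) =====
theorem invert_histogram_spec : Claim_equal_invert_histogram := by
  intro h _
  exact invert_histogram_eq h
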